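-- pv_equiv track=rewrite | github.com/jayaramsivaramannair/code_challenges | day10/20210627a.py | checkBlanagrams
-- ===== SOURCE A (Python) =====
-- def checkBlanagrams(word1, word2):
--     char_count = {}
--     count_odd = 0
--
--     # Go through word1 and add the character count to the dictionary
--     for i in range(len(word1)):  # 0(n)
--         if word1[i] in char_count:
--             char_count[word1[i]] += 1
--         else:
--             char_count[word1[i]] = 1
--
--     # Go through word2 and add the character count to the dictionary
--     for i in range(len(word2)):  # O(n)
--         if word2[i] in char_count:
--             char_count[word2[i]] += 1
--         else:
--             char_count[word2[i]] = 1
--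
--     # Track the value in count_odd variable to see if any character appears odd number of times in either word
--     # count_odd variable will be 0 if words are perfect anagrams of each other.
--     # If the count_odd variable is 2 it means that there are two characters which do not appear in either words and thus can be subsitutions for each other
--     for value in char_count.values():  # O(n)
--         if value % 2:
--             count_odd += 1
--
--     return count_odd == 2
-- ===== SOURCE B (Python) =====
-- def checkBlanagrams(word1, word2):
--     # Sort the combined letters, then scan runs of equal letters once,
--     # counting runs of odd length; a blanagram has exactly two such runs.
--     letters = sorted(word1 + word2)
--     odd = 0
--     run = 0
--     prev = None
--     for c in letters:
--         if c == prev: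
--             run += 1
--         else:
--             if run % 2:
--                 odd += 1
--             prev = c
--             run = 1
--     if run % 2:
--         odd += 1
--     return odd == 2
-- ===== Notes on version B (the rewrite author's own statement) =====
-- stated objective: alternative
-- what changed: Replaces A's character-count dictionary plus a final pass over its values with sort-then-scan: sort the combined letters once, then count odd-length runs of equal letters in a single linear scan of the sorted list.
import Mathlib
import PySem

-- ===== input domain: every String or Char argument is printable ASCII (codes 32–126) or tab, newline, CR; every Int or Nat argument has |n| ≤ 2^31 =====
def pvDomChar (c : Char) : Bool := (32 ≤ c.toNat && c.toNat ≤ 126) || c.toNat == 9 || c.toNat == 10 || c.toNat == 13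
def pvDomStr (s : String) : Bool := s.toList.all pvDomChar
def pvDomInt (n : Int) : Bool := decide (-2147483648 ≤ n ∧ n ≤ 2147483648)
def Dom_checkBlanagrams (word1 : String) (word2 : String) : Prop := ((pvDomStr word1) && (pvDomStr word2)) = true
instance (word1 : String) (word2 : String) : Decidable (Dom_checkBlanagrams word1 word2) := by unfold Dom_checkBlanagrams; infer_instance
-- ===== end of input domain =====

-- B drops A's count dictionary and its value-scanning pass: it sorts the combined letters
-- once and counts odd-length runs of equal letters in one scan (equal result; not faster).

-- ===== PORT A =====
-- step of A's first two loops: count each character into the dict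
def pvCountStep (d : PySem.Dict Char Int) (c : Char) : PySem.Dict Char Int :=
  if d.contains c then d.modify c 0 (fun x => x + 1) else d.insert c 1

def checkBlanagrams (word1 : String) (word2 : String) : Bool :=
  decide (((word2.toList.foldl pvCountStep
      (word1.toList.foldl pvCountStep PySem.Dict.empty)).values.foldl
    (fun n v => if PySem.Int.mod v 2 ≠ 0 then n + 1 else n) (0 : Int)) = 2)

-- ===== PORT B =====
-- one iteration of B's scan over the sorted letters: state (odd, run, prev)
def pvRunStep (st : Int × Int × Option Char) (c : Char) : Int × Int × Option Char :=
  match st with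
  | (odd, run, prev) =>
    if prev = some c then (odd, run + 1, prev)
    else ((if PySem.Int.mod run 2 ≠ 0 then odd + 1 else odd), 1, some c)

def checkBlanagrams_alt (word1 : String) (word2 : String) : Bool :=
  let letters := PySem.List.sorted (word1.toList ++ word2.toList) (fun c => c) false
  let st := letters.foldl pvRunStep ((0 : Int), (0 : Int), (none : Option Char))
  decide ((if PySem.Int.mod st.2.1 2 ≠ 0 then st.1 + 1 else st.1) = 2)

-- ===== PRECONDITION & SPEC =====
def Spec_checkBlanagrams (word1 : String) (word2 : String) (out : Bool) : Prop := out = checkBlanagrams_alt word1 word2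
instance (word1 : String) (word2 : String) (out : Bool) : Decidable (Spec_checkBlanagrams word1 word2 out) := by unfold Spec_checkBlanagrams; infer_instance

-- ===== CLAIM (what is proved, stated in full; the proofs are below) =====
def Claim_equal_checkBlanagrams : Prop := ∀ (word1 : String) (word2 : String), Dom_checkBlanagrams word1 word2 → Spec_checkBlanagrams word1 word2 (checkBlanagrams word1 word2)

-- ===== LEMMAS AND PROOFS =====

-- number of distinct characters of t occurring an odd number of times
def pvOddD (t : List Char) : Nat :=
  (PySem.Set.ofList t).countP (fun k => decide (t.count k % 2 = 1))

-- B's final flush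
def pvFinish (st : Int × Int × Option Char) : Int :=
  if PySem.Int.mod st.2.1 2 ≠ 0 then st.1 + 1 else st.1

-- A's counting step is exactly the Counter step (the 'else' branch inserts 0 + 1 = 1)
lemma pvCountStep_eq (d : PySem.Dict Char Int) (c : Char) :
    pvCountStep d c = d.modify c 0 (fun x => x + 1) := by
  unfold pvCountStep
  by_cases h : d.contains c = true
  · simp [h]
  · simp [h, PySem.Dict.modify,
      PySem.Dict.getD_of_not_contains d (0 : Int) (by simpa using h)]

-- countP on nodup lists depends only on the membership set
lemma countP_eq_of_nodup (l1 l2 : List Char) (h1 : l1.Nodup) (h2 : l2.Nodup)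
    (hm : ∀ x, x ∈ l1 ↔ x ∈ l2) (p : Char → Bool) : l1.countP p = l2.countP p := by
  rw [List.countP_eq_length_filter, List.countP_eq_length_filter]
  exact List.Perm.length_eq
    ((List.perm_ext_iff_of_nodup (h1.filter p) (h2.filter p)).mpr
      (by intro x; simp [List.mem_filter, hm x]))

-- the Int-odd flush test equals the Nat-odd test on a nonnegative cast
lemma flush_cast (m : Nat) :
    (if PySem.Int.mod (m : Int) 2 ≠ 0 then (1 : Int) else 0)
      = (if m % 2 = 1 then (1 : Nat) else 0) := by
  rw [PySem.Int.mod_eq_emod_of_pos (by norm_num)]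
  by_cases h : m % 2 = 1
  · simp [h]; omega
  · simp [h]; omega

-- fold over a block of equal characters just extends the current run
lemma fold_run_block (c : Char) (u : List Char) (hu : ∀ x ∈ u, x = c) :
    ∀ (odd run : Int),
      u.foldl pvRunStep (odd, run, some c) = (odd, run + (u.length : Int), some c) := by
  induction u with
  | nil => intro odd run; simp
  | cons x v ih =>
    intro odd run
    have hx : x = c := hu x (by simp)
    subst hx
    have := ih (fun y hy => hu y (by simp [hy])) odd (run + 1)
    simp only [List.foldl_cons, pvRunStep, if_true, this]
    simp [Prod.ext_iff]
    ring

-- splitting off the leading run of equal characters splits the odd-distinct count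
lemma pvOddD_cons (c : Char) (u t' : List Char) (hu : ∀ x ∈ u, x = c) (hc : c ∉ t') :
    pvOddD (c :: (u ++ t')) = (if (1 + u.length) % 2 = 1 then 1 else 0) + pvOddD t' := by
  unfold pvOddD
  have hcnt_c : (c :: (u ++ t')).count c = 1 + u.length := by
    have hu' : u.count c = u.length := by
      rw [List.count_eq_length]
      intro x hx; exact ((hu x hx).symm ▸ rfl)
    simp [List.count_append, hu',
      List.count_eq_zero_of_not_mem hc]
    omega
  have hcnt_k : ∀ k, k ≠ c → (c :: (u ++ t')).count k = t'.count k := by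
    intro k hk
    have hku : k ∉ u := fun h => hk (hu k h)
    simp [List.count_append,
      List.count_eq_zero_of_not_mem hku, Ne.symm hk]
  have hmemset : ∀ x, x ∈ PySem.Set.ofList (c :: (u ++ t')) ↔ x ∈ (c :: PySem.Set.ofList t') := by
    intro x
    rw [PySem.Set.mem_ofList]
    constructor
    · intro hx
      rcases List.mem_cons.mp hx with h | h
      · exact List.mem_cons.mpr (Or.inl h)
      · rcases List.mem_append.mp h with h | h
        · exact List.mem_cons.mpr (Or.inl (hu x h))
        · exact List.mem_cons.mpr (Or.inr ((PySem.Set.mem_ofList t' x).mpr h))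
    · intro hx
      rcases List.mem_cons.mp hx with h | h
      · exact h ▸ List.mem_cons_self
      · exact List.mem_cons.mpr (Or.inr (List.mem_append.mpr (Or.inr ((PySem.Set.mem_ofList t' x).mp h))))
  have hnd2 : (c :: PySem.Set.ofList t').Nodup := by
    refine List.nodup_cons.mpr ⟨?_, PySem.Set.nodup_ofList t'⟩
    intro h; exact hc ((PySem.Set.mem_ofList t' c).mp h)
  rw [countP_eq_of_nodup _ _ (PySem.Set.nodup_ofList _) hnd2 hmemset]
  rw [List.countP_cons]
  have htail : (PySem.Set.ofList t').countP (fun k => decide ((c :: (u ++ t')).count k % 2 = 1))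
      = (PySem.Set.ofList t').countP (fun k => decide (t'.count k % 2 = 1)) := by
    apply List.countP_congr
    intro k hk
    have hkc : k ≠ c := by
      intro h; subst h; exact hc ((PySem.Set.mem_ofList t' k).mp hk)
    rw [hcnt_k k hkc]
  rw [htail, hcnt_c]
  by_cases h : (1 + u.length) % 2 = 1 <;> simp [h] <;> omega

-- in a sorted list the leading character does not reappear after its run
lemma not_mem_dropWhile (c : Char) (t : List Char)
    (hp : (c :: t).Pairwise (· ≤ ·)) : c ∉ t.dropWhile (fun x => x == c) := by
  intro hmem
  set t' := t.dropWhile (fun x => x == c) with ht'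
  cases h : t' with
  | nil => rw [h] at hmem; exact (List.not_mem_nil) hmem
  | cons hd r =>
    have hhd : ¬ (hd == c) = true := by
      have := List.head?_dropWhile_not (fun x => x == c) t
      rw [← ht', h] at this
      simpa using this
    have hhdne : hd ≠ c := by simpa using hhd
    have hsub : t'.Sublist t := ht' ▸ List.dropWhile_sublist _
    have hpt' : t'.Pairwise (· ≤ ·) :=
      (List.pairwise_cons.mp hp).2.sublist hsub
    have hclehd : c ≤ hd := by
      have : hd ∈ t := hsub.mem (h ▸ List.mem_cons_self)
      exact (List.pairwise_cons.mp hp).1 hd this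
    have hlt : c < hd := lt_of_le_of_ne hclehd (Ne.symm hhdne)
    rw [h] at hmem
    rcases List.mem_cons.mp hmem with he | hr
    · exact hhdne he.symm
    · have : hd ≤ c := (List.pairwise_cons.mp (h ▸ hpt')).1 c hr
      exact absurd (lt_of_lt_of_le hlt this) (lt_irrefl c)

-- main invariant of B's scan: on a sorted list it counts the odd-length runs
lemma runScan : ∀ (n : Nat) (s : List Char), s.length ≤ n → s.Pairwise (· ≤ ·) →
    ∀ (odd run : Int) (p : Option Char), (∀ c, p = some c → c ∉ s) →
    pvFinish (s.foldl pvRunStep (odd, run, p)) =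
      odd + (if PySem.Int.mod run 2 ≠ 0 then 1 else 0) + (pvOddD s : Int) := by
  intro n
  induction n with
  | zero =>
    intro s hs _ odd run p _
    have : s = [] := List.length_eq_zero_iff.mp (Nat.le_zero.mp hs)
    subst this
    simp only [List.foldl_nil, pvFinish, pvOddD, PySem.Set.ofList]
    split_ifs <;> simp
  | succ n ih =>
    intro s hs hpw odd run p hp
    cases s with
    | nil =>
      simp only [List.foldl_nil, pvFinish, pvOddD, PySem.Set.ofList]
      split_ifs <;> simp
    | cons c t =>
      have hpne : p ≠ some c := by
        intro h; exact hp c h List.mem_cons_self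
      set u := t.takeWhile (fun x => x == c) with hu
      set t' := t.dropWhile (fun x => x == c) with ht'
      have hsplit : t = u ++ t' := (List.takeWhile_append_dropWhile).symm
      have hual : ∀ x ∈ u, x = c := by
        intro x hx
        have := List.mem_takeWhile_imp (hu ▸ hx)
        simpa using this
      have hct' : c ∉ t' := not_mem_dropWhile c t hpw
      -- first step flushes the pending run and starts a new one
      have hstep : pvRunStep (odd, run, p) c
          = ((if PySem.Int.mod run 2 ≠ 0 then odd + 1 else odd), 1, some c) := by
        simp [pvRunStep, hpne]
      set odd' := (if PySem.Int.mod run 2 ≠ 0 then odd + 1 else odd) with hodd'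
      have hlen : t'.length ≤ n := by
        have h1 : (c :: t).length ≤ n + 1 := hs
        have h2 : t'.length ≤ t.length := by
          rw [hsplit]; simp
        simp only [List.length_cons] at h1
        omega
      have hpw' : t'.Pairwise (· ≤ ·) :=
        (List.pairwise_cons.mp hpw).2.sublist (ht' ▸ List.dropWhile_sublist _)
      have hrec := ih t' hlen hpw' odd' (1 + (u.length : Int)) (some c)
        (fun d hd => by cases hd; exact hct')
      have hblock := fold_run_block c u hual odd' 1
      calc pvFinish ((c :: t).foldl pvRunStep (odd, run, p))
          = pvFinish (t'.foldl pvRunStep (odd', 1 + (u.length : Int), some c)) := by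
            rw [List.foldl_cons, hstep, hsplit, List.foldl_append, hblock]
        _ = odd' + (if PySem.Int.mod (1 + (u.length : Int)) 2 ≠ 0 then 1 else 0)
              + (pvOddD t' : Int) := hrec
        _ = odd + (if PySem.Int.mod run 2 ≠ 0 then 1 else 0) + (pvOddD (c :: t) : Int) := by
            have hflush : (if PySem.Int.mod (1 + (u.length : Int)) 2 ≠ 0 then (1 : Int) else 0)
                = ((if (1 + u.length) % 2 = 1 then (1 : Nat) else 0) : Int) := by
              have := flush_cast (1 + u.length)
              push_cast at this ⊢
              rw [← this]
            have hodd : pvOddD (c :: t) = (if (1 + u.length) % 2 = 1 then 1 else 0) + pvOddD t' := by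
              rw [hsplit]; exact pvOddD_cons c u t' hual hct'
            rw [hflush, hodd, hodd']
            split_ifs <;> push_cast <;> ring

-- ===== VERDICT (by name: the statement is the Claim_ definition above) =====
theorem checkBlanagrams_spec : Claim_equal_checkBlanagrams := by
  intro word1 word2 _
  unfold Spec_checkBlanagrams checkBlanagrams checkBlanagrams_alt
  set l := word1.toList ++ word2.toList with hl
  -- A's dictionary is the Counter of the concatenation
  have hstep : pvCountStep = fun d c => PySem.Dict.modify d c 0 (fun x => x + 1) := by
    funext d c; exact pvCountStep_eq d c
  have hdict :
      word2.toList.foldl pvCountStep (word1.toList.foldl pvCountStep PySem.Dict.empty)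
        = PySem.Dict.counter l := by
    rw [← List.foldl_append, hstep, PySem.Dict.counter_eq_foldl]
  rw [hdict]
  -- A's third loop counts the odd values of the Counter
  have hvals : (PySem.Dict.counter l).values
      = (PySem.Set.ofList l).map (fun k => ((l.count k : Int))) := by
    show ((PySem.Dict.counter l).items).map Prod.snd = _
    rw [PySem.Dict.items_counter l, List.map_map]
    rfl
  have hif : (fun (n : Int) v => if PySem.Int.mod v 2 ≠ 0 then n + 1 else n)
      = (fun (n : Int) v => if (fun v => decide (PySem.Int.mod v 2 ≠ 0)) v = true
          then n + 1 else n) := by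
    funext n v; simp
  rw [hvals, hif, PySem.List.foldl_count_if, List.countP_map]
  -- both predicates say: the character occurs an odd number of times in l
  have hcongr : (PySem.Set.ofList l).countP
        ((fun v => decide (PySem.Int.mod v 2 ≠ 0)) ∘ fun k => ((l.count k : Int)))
      = pvOddD l := by
    apply List.countP_congr
    intro k _
    simp only [Function.comp]
    rw [PySem.Int.mod_eq_emod_of_pos (b := 2) (by norm_num)]
    have : ((l.count k : Int)) % 2 ≠ 0 ↔ l.count k % 2 = 1 := by omega
    simp [this]
  rw [hcongr]
  -- B's scan of the sorted letters counts the same quantity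
  set s := PySem.List.sorted l (fun c => c) false with hsdef
  have hpw : s.Pairwise (· ≤ ·) := by
    have := PySem.List.sorted_pairwise (xs := l) (key := fun c => c)
    simpa using this
  have hscan := runScan s.length s le_rfl hpw 0 0 none (fun c h => by cases h)
  have hperm : s.Perm l := PySem.List.sorted_perm l (fun c => c) false
  have hodds : pvOddD s = pvOddD l := by
    unfold pvOddD
    have hcount : ∀ k, s.count k = l.count k := fun k => hperm.count_eq k
    have hm : ∀ x, x ∈ PySem.Set.ofList s ↔ x ∈ PySem.Set.ofList l := by
      intro x
      rw [PySem.Set.mem_ofList, PySem.Set.mem_ofList]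
      exact hperm.mem_iff
    calc (PySem.Set.ofList s).countP (fun k => decide (s.count k % 2 = 1))
        = (PySem.Set.ofList s).countP (fun k => decide (l.count k % 2 = 1)) := by
          apply List.countP_congr; intro k _; rw [hcount k]
      _ = (PySem.Set.ofList l).countP (fun k => decide (l.count k % 2 = 1)) :=
          countP_eq_of_nodup _ _ (PySem.Set.nodup_ofList s) (PySem.Set.nodup_ofList l) hm _
  have hB : (if PySem.Int.mod (s.foldl pvRunStep ((0:Int), (0:Int), (none : Option Char))).2.1 2 ≠ 0
        then (s.foldl pvRunStep ((0:Int), (0:Int), (none : Option Char))).1 + 1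
        else (s.foldl pvRunStep ((0:Int), (0:Int), (none : Option Char))).1)
      = (pvOddD l : Int) := by
    have : pvFinish (s.foldl pvRunStep ((0:Int), (0:Int), (none : Option Char)))
        = 0 + (if PySem.Int.mod 0 2 ≠ 0 then 1 else 0) + (pvOddD s : Int) := hscan
    simp only [pvFinish] at this
    rw [this, hodds]
    norm_num [PySem.Int.mod]
  simp only [hB]
  norm_num
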